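-- pv_equiv track=rewrite | github.com/michaelpeterswa/CPSC322Project-WildfireAnalysis | mysklearn/myutils.py | split_into_genres
-- ===== SOURCE A (Python) =====
-- def split_into_genres(data_col, genre_col, genres):
--     ratings_by_genre = {}
--     for g in genres:
--         ratings_by_genre[g] = []
--     for i, x in enumerate(data_col):
--         if x != "":
--             for g in genres:
--                 if g in genre_col[i]:
--                     ratings_by_genre[g].append(x)
--     data = []
--     for g in genres:
--         data.append(ratings_by_genre[g])
--     return data
-- ===== SOURCE B (Python) =====
-- def split_into_genres(data_col, genre_col, genres):
--     return [[x for i, x in enumerate(data_col) if x != "" and g in genre_col[i]]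
--             for g in genres]
-- ===== Notes on version B (the rewrite author's own statement) =====
-- stated objective: idiomatic
-- what changed: Replaced the per-item scatter into a pre-keyed dict (build dict of empty lists, append while scanning data, read back out) by a direct per-genre gather: a nested list comprehension, outer over genres and inner over enumerated data, with no intermediate dict.
-- outside the precondition, e.g. on split_into_genres(['5'], ['A'], ['A', 'A']): A returns [['5', '5'], ['5', '5']], B returns [['5'], ['5']]
import Mathlib
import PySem

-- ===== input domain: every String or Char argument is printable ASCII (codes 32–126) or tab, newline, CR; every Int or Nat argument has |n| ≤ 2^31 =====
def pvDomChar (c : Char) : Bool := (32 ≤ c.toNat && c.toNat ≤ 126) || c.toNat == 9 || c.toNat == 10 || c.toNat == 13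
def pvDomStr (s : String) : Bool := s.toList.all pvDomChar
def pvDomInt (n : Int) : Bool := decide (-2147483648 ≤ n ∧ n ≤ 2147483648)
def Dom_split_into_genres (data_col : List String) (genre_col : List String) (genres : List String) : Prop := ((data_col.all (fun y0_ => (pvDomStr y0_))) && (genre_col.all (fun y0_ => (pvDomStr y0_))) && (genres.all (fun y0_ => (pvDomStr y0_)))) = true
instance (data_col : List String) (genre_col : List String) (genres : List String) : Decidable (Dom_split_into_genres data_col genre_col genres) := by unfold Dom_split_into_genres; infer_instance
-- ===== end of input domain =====

-- B replaces A's scatter-into-a-dict (pre-keyed dict of empty lists, appended to while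
-- scanning the data, then read back out in genre order) by a direct per-genre gather:
-- a nested comprehension, outer over genres, inner over the enumerated data. Objective: idiomatic.

-- ===== PORT A =====
def split_into_genres (data_col : List String) (genre_col : List String) (genres : List String) : List (List String) :=
  -- ratings_by_genre = {}; for g in genres: ratings_by_genre[g] = []
  let d0 : PySem.Dict String (List String) :=
    genres.foldl (fun d g => d.insert g []) PySem.Dict.empty
  -- for i, x in enumerate(data_col): if x != "": for g in genres: if g in genre_col[i]: append
  -- genre_col[i]: i is always a valid non-negative index under Pre_; pyGetD's default is never read there
  let d :=
    (PySem.List.enumerate data_col).foldl (fun d p =>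
      if p.2 ≠ "" then
        genres.foldl (fun d g =>
          if PySem.Str.isIn g (PySem.List.pyGetD genre_col p.1 "") then
            d.modify g [] (fun l => l ++ [p.2])
          else d) d
      else d) d0
  -- data = []; for g in genres: data.append(ratings_by_genre[g])
  genres.foldl (fun acc g => acc ++ [d.getD g []]) []

-- ===== PORT B =====
-- [x for i, x in enumerate(data_col) if x != "" and g in genre_col[i]]
def pvGather (data_col : List String) (genre_col : List String) (g : String) : List String :=
  ((PySem.List.enumerate data_col).filter
    (fun p => (p.2 != "") && PySem.Str.isIn g (PySem.List.pyGetD genre_col p.1 ""))).map (fun p => p.2)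

def split_into_genres_alt (data_col : List String) (genre_col : List String) (genres : List String) : List (List String) :=
  genres.map (fun g => pvGather data_col genre_col g)

-- ===== PRECONDITION & SPEC =====
-- Pre_ excludes (a) inputs where some nonempty data entry's index is out of range in genre_col,
-- on which A raises IndexError, and (b) inputs where a genre label occurring more than once in
-- genres matches some nonempty data entry, on which A appends that entry once per duplicate
-- occurrence into one shared list -- an accidental double-counting corner, both behaviours defensible.
def Pre_split_into_genres (data_col : List String) (genre_col : List String) (genres : List String) : Prop :=
  (∀ p ∈ PySem.List.enumerate data_col, p.2 ≠ "" → p.1 < (genre_col.length : Int)) ∧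
  (∀ g ∈ genres, 1 < genres.count g →
    ∀ p ∈ PySem.List.enumerate data_col,
      ¬(p.2 ≠ "" ∧ PySem.Str.isIn g (PySem.List.pyGetD genre_col p.1 "") = true))
instance (data_col : List String) (genre_col : List String) (genres : List String) : Decidable (Pre_split_into_genres data_col genre_col genres) := by unfold Pre_split_into_genres; infer_instance

def pvWitness_split_into_genres : List String × List String × List String :=
  (["5", "", "7"], ["AB", "X", "BC"], ["A", "B", "C"])

def Spec_split_into_genres (data_col : List String) (genre_col : List String) (genres : List String) (out : List (List String)) : Prop := out = split_into_genres_alt data_col genre_col genres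
instance (data_col : List String) (genre_col : List String) (genres : List String) (out : List (List String)) : Decidable (Spec_split_into_genres data_col genre_col genres out) := by unfold Spec_split_into_genres; infer_instance

-- ===== CLAIM (what is proved, stated in full; the proofs are below) =====
def Claim_equal_split_into_genres : Prop := ∀ (data_col : List String) (genre_col : List String) (genres : List String), Dom_split_into_genres data_col genre_col genres → Pre_split_into_genres data_col genre_col genres → Spec_split_into_genres data_col genre_col genres (split_into_genres data_col genre_col genres)

-- ===== LEMMAS AND PROOFS =====

-- The initial dict of empty lists reads back [] (the getD default) at every key.
theorem pv_init_getD (gs : List String) (d : PySem.Dict String (List String))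
    (h : ∀ g, d.getD g [] = []) (g : String) :
    (gs.foldl (fun d g => d.insert g []) d).getD g [] = [] := by
  induction gs generalizing d with
  | nil => exact h g
  | cons a t ih =>
      refine ih _ (fun g' => ?_)
      show (d.insert a []).getD g' [] = []
      by_cases hg : g' = a
      · subst hg; simp [PySem.Dict.getD_insert_self]
      · rw [PySem.Dict.getD_insert_of_ne d [] [] hg]; exact h g'

-- One item's inner loop over genres: key g gains one copy of x per occurrence of g, when c g holds.
theorem pv_inner (c : String → Bool) (x : String) (gs : List String)
    (d : PySem.Dict String (List String)) (g : String) :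
    (gs.foldl (fun d g' => if c g' then d.modify g' [] (fun l => l ++ [x]) else d) d).getD g []
      = d.getD g [] ++ (if c g then List.replicate (gs.count g) x else []) := by
  induction gs generalizing d with
  | nil => simp
  | cons a t ih =>
      simp only [List.foldl_cons]
      rw [ih]
      by_cases hg : g = a
      · subst hg
        by_cases hc : c g = true
        · simp [hc, PySem.Dict.getD_modify_self, List.replicate_succ]
        · simp [hc]
      · have hstep : (if c a then d.modify a [] (fun l => l ++ [x]) else d).getD g [] = d.getD g [] := by
          by_cases hc : c a = true
          · simp [hc, PySem.Dict.getD_modify_of_ne _ _ _ hg]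
          · simp [hc]
        rw [hstep]
        simp [Ne.symm hg]

-- The whole scatter loop: when g's duplicates never fire, key g ends with B's gathered list for g.
theorem pv_outer (genre_col : List String) (gs : List String)
    (ps : List (Int × String)) (d : PySem.Dict String (List String)) (g : String)
    (hsafe : gs.count g = 1 ∨
      ∀ p ∈ ps, ¬(p.2 ≠ "" ∧ PySem.Str.isIn g (PySem.List.pyGetD genre_col p.1 "") = true)) :
    (ps.foldl (fun d p =>
        if p.2 ≠ "" then
          gs.foldl (fun d g' =>
            if PySem.Str.isIn g' (PySem.List.pyGetD genre_col p.1 "") then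
              d.modify g' [] (fun l => l ++ [p.2])
            else d) d
        else d) d).getD g []
      = d.getD g [] ++
        (ps.filter (fun p => (p.2 != "") && PySem.Str.isIn g (PySem.List.pyGetD genre_col p.1 ""))).map (fun p => p.2) := by
  induction ps generalizing d with
  | nil => simp
  | cons p t ih =>
      have hsafe' : gs.count g = 1 ∨
          ∀ q ∈ t, ¬(q.2 ≠ "" ∧ PySem.Str.isIn g (PySem.List.pyGetD genre_col q.1 "") = true) := by
        rcases hsafe with h | h
        · exact Or.inl h
        · exact Or.inr (fun q hq => h q (List.mem_cons_of_mem _ hq))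
      simp only [List.foldl_cons]
      rw [ih _ hsafe']
      by_cases he : p.2 = ""
      · simp [he]
      · simp only [he, ne_eq, not_false_eq_true, if_pos]
        rw [pv_inner]
        by_cases hc : PySem.Str.isIn g (PySem.List.pyGetD genre_col p.1 "") = true
        · have hcount : gs.count g = 1 := by
            rcases hsafe with h | h
            · exact h
            · exact absurd ⟨he, hc⟩ (h p (List.mem_cons_self))
          rw [PySem.Str.isIn_eq] at hc
          simp [he, hc, hcount]
        · rw [PySem.Str.isIn_eq] at hc
          simp [hc]

-- ===== VERDICT (by name: the statement is the Claim_ definition above) =====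
theorem split_into_genres_spec : Claim_equal_split_into_genres := by
  intro data_col genre_col genres _ hpre
  unfold Spec_split_into_genres split_into_genres split_into_genres_alt
  rw [PySem.List.foldl_append_singleton_eq_map]
  simp only [List.nil_append]
  refine List.map_congr_left (fun g hg => ?_)
  have hsafe : genres.count g = 1 ∨
      ∀ p ∈ PySem.List.enumerate data_col,
        ¬(p.2 ≠ "" ∧ PySem.Str.isIn g (PySem.List.pyGetD genre_col p.1 "") = true) := by
    by_cases hdup : 1 < genres.count g
    · exact Or.inr (hpre.2 g hg hdup)
    · have : 0 < genres.count g := List.count_pos_iff.mpr hg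
      exact Or.inl (by omega)
  rw [pv_outer genre_col genres _ _ g hsafe,
      pv_init_getD genres PySem.Dict.empty (fun g' => rfl) g]
  rfl
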